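-- pv_equiv track=rewrite | github.com/HmbleCreator/ddin-reservoir | Experiments/ddin_exp49_pingala_32d(b).py | compute_pingala_address
-- ===== SOURCE A (Python) =====
-- LONG_VOWELS  = set('AEIOUfF')
--
-- SHORT_VOWELS = set('aiux')
--
-- CONSONANTS   = set('kKgGNcCjJYwWqQRtTdDnpPbBmyrlvSzsh')
--
-- def compute_pingala_address(root_slp1, max_syllables=4):
--     chars = list(root_slp1)
--     syllables = []
--     i = 0
--     while i < len(chars):
--         c = chars[i]
--         if c in LONG_VOWELS or c in SHORT_VOWELS:
--             is_guru = c in LONG_VOWELS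
--             j, cluster = i + 1, 0
--             while j < len(chars) and chars[j] in CONSONANTS:
--                 cluster += 1
--                 j += 1
--             if cluster > 1:
--                 is_guru = True
--             syllables.append(1 if is_guru else 0)
--             i = j
--         else:
--             i += 1
--     addr = syllables[:max_syllables]
--     while len(addr) < max_syllables:
--         addr.append(0)
--     return addr
-- ===== SOURCE B (Python) =====
-- LONG_VOWELS  = set('AEIOUfF')
--
-- SHORT_VOWELS = set('aiux')
--
-- CONSONANTS   = set('kKgGNcCjJYwWqQRtTdDnpPbBmyrlvSzsh')
--
-- def compute_pingala_address(root_slp1, max_syllables=4):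
--     # Single pass: build syllable tokens (vowel + its trailing consonant run),
--     # then classify each token uniformly in a second pass.
--     tokens = []
--     attached = False
--     for c in root_slp1:
--         if c in LONG_VOWELS or c in SHORT_VOWELS:
--             tokens.append(c)
--             attached = True
--         elif attached and c in CONSONANTS:
--             tokens[-1] += c
--         else:
--             attached = False
--     bits = [1 if t[0] in LONG_VOWELS or len(t) - 1 > 1 else 0 for t in tokens]
--     addr = bits[:max_syllables]
--     return addr + [0] * (max_syllables - len(addr))
-- ===== Notes on version B (the rewrite author's own statement) =====
-- stated objective: alternative
-- what changed: Replaces A's two-pointer while-loop (inner scan counting each vowel's consonant cluster, then an in-place one-by-one pad loop) with a single forward pass that accumulates syllable tokens (vowel plus attached consonant run) followed by a uniform classification pass, slicing and padding arithmetically ([0]*k instead of a pad loop).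
import Mathlib
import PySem

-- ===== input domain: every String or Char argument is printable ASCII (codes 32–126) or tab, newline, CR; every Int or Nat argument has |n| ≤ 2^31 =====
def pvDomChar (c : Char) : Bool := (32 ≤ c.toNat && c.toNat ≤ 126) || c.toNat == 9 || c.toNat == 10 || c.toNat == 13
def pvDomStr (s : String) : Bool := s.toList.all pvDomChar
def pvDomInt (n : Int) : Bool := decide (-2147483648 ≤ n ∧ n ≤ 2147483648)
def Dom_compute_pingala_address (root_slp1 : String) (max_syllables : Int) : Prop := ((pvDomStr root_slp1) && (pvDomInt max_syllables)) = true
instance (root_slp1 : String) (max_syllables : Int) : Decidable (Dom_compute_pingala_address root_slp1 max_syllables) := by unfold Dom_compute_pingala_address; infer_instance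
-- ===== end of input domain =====

-- B replaces A's two-pointer index scan by a single pass that builds syllable tokens
-- (vowel + trailing consonant run) and a uniform second pass classifying each token
-- (objective: alternative decomposition, same cost).

-- character classes (the module-level sets of A; both programs use them)
def isLong (c : Char) : Bool := ['A','E','I','O','U','f','F'].contains c
def isShort (c : Char) : Bool := ['a','i','u','x'].contains c
def isCons (c : Char) : Bool :=
  ['k','K','g','G','N','c','C','j','J','Y','w','W','q','Q','R','t','T','d','D','n',
   'p','P','b','B','m','y','r','l','v','S','z','s','h'].contains c

-- ===== PORT A =====
-- inner while loop of A: counts the consonant cluster and returns the remaining suffix (= chars[j:])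
def countCluster : List Char → Int × List Char
  | [] => (0, [])
  | c :: rest =>
    if isCons c then
      let p := countCluster rest
      (p.1 + 1, p.2)
    else (0, c :: rest)

theorem countCluster_snd_length (l : List Char) : (countCluster l).2.length ≤ l.length := by
  induction l with
  | nil => simp [countCluster]
  | cons c rest ih =>
    simp only [countCluster]
    split
    · simp; omega
    · simp

-- outer while loop of A, building `syllables`
def aLoop (l : List Char) : List Int :=
  match l with
  | [] => []
  | c :: rest =>
    if isLong c || isShort c then
      let p := countCluster rest
      let is_guru : Bool := isLong c || decide (p.1 > 1)
      (if is_guru then (1 : Int) else 0) :: aLoop p.2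
    else aLoop rest
termination_by l.length
decreasing_by
  · have := countCluster_snd_length rest
    simp only [List.length_cons]
    omega
  · simp

-- A's final pad loop: while len(addr) < max_syllables: addr.append(0)
def padA (addr : List Int) (m : Int) : List Int :=
  if (addr.length : Int) < m then padA (addr ++ [0]) m else addr
termination_by (m - addr.length).toNat
decreasing_by
  simp only [List.length_append, List.length_cons, List.length_nil]
  omega

def compute_pingala_address (root_slp1 : String) (max_syllables : Int) : List Int :=
  let syllables := aLoop root_slp1.toList
  let addr := PySem.List.slice syllables none (some max_syllables)
  padA addr max_syllables

-- ===== PORT B =====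
-- one step of B's for-loop; state = (tokens, attached)
def bStep (st : List (List Char) × Bool) (c : Char) : List (List Char) × Bool :=
  if isLong c || isShort c then (st.1 ++ [[c]], true)
  else if st.2 && isCons c then (st.1.dropLast ++ [st.1.getLastD [] ++ [c]], true)
  else (st.1, false)

-- 1 if t[0] in LONG_VOWELS or len(t) - 1 > 1 else 0
def classify (t : List Char) : Int :=
  if isLong (t.headD ' ') || (t.length : Int) - 1 > 1 then 1 else 0

def compute_pingala_address_alt (root_slp1 : String) (max_syllables : Int) : List Int :=
  let tokens := (root_slp1.toList.foldl bStep ([], false)).1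
  let bits := tokens.map classify
  let addr := PySem.List.slice bits none (some max_syllables)
  addr ++ List.replicate (max_syllables - addr.length).toNat 0

-- ===== PRECONDITION & SPEC =====
def Spec_compute_pingala_address (root_slp1 : String) (max_syllables : Int) (out : List Int) : Prop := out = compute_pingala_address_alt root_slp1 max_syllables
instance (root_slp1 : String) (max_syllables : Int) (out : List Int) : Decidable (Spec_compute_pingala_address root_slp1 max_syllables out) := by unfold Spec_compute_pingala_address; infer_instance

-- ===== CLAIM (what is proved, stated in full; the proofs are below) =====
def Claim_equal_compute_pingala_address : Prop := ∀ (root_slp1 : String) (max_syllables : Int), Dom_compute_pingala_address root_slp1 max_syllables → Spec_compute_pingala_address root_slp1 max_syllables (compute_pingala_address root_slp1 max_syllables)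

-- ===== LEMMAS AND PROOFS =====

-- a vowel character is never a consonant character
theorem vowel_not_cons (c : Char) (hv : (isLong c || isShort c) = true) : isCons c = false := by
  simp [isLong, isShort] at hv
  rcases hv with ((rfl|rfl|rfl|rfl|rfl|rfl|rfl)|(rfl|rfl|rfl|rfl)) <;> decide

-- proof-side tokenizer: the common recursive characterization of both loops
def tks : List Char → List (List Char)
  | [] => []
  | c :: rest =>
    if isLong c || isShort c then
      (c :: rest.takeWhile isCons) :: tks (rest.dropWhile isCons)
    else tks rest
termination_by l => l.length
decreasing_by
  · have := List.length_dropWhile_le isCons rest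
    simp only [List.length_cons]
    omega
  · simp

theorem countCluster_eq (l : List Char) :
    countCluster l = (((l.takeWhile isCons).length : Int), l.dropWhile isCons) := by
  induction l with
  | nil => simp [countCluster]
  | cons c rest ih =>
    simp only [countCluster, List.takeWhile, List.dropWhile]
    cases h : isCons c with
    | true => simp [ih]
    | false => simp

theorem aLoop_eq_map_classify (l : List Char) : aLoop l = (tks l).map classify := by
  induction l using aLoop.induct with
  | case1 => simp [aLoop, tks]
  | case2 c rest h p ih =>
    simp only [aLoop, tks, h, if_pos, countCluster_eq, List.map_cons]
    congr 1
    · simp only [classify, List.headD, List.length_cons]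
      have e : ((((rest.takeWhile isCons).length + 1 : ℕ) : Int) - 1 > 1)
          ↔ (((rest.takeWhile isCons).length : Int) > 1) := by
        push_cast
        omega
      simp only [e]
    · have hp : p.2 = List.dropWhile isCons rest := by
        rw [show p = countCluster rest from rfl, countCluster_eq]
      rw [hp] at ih
      exact ih
  | case3 c rest h ih => simp [aLoop, tks, h, ih]

-- fold invariant for B's single pass, both attachment states at once
theorem bFold_invariant (l : List Char) :
    (∀ acc : List (List Char), (l.foldl bStep (acc, false)).1 = acc ++ tks l) ∧
    (∀ (acc : List (List Char)) (tok : List Char),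
      (l.foldl bStep (acc ++ [tok], true)).1
        = acc ++ [tok ++ l.takeWhile isCons] ++ tks (l.dropWhile isCons)) := by
  induction l with
  | nil => simp [tks]
  | cons c rest ih =>
    obtain ⟨ih1, ih2⟩ := ih
    constructor
    · intro acc
      by_cases hv : (isLong c || isShort c) = true
      · simp only [List.foldl_cons, bStep, hv, if_pos]
        rw [ih2 acc [c]]
        simp [tks, hv]
      · have hv' : (isLong c || isShort c) = false := by simpa using hv
        simp only [List.foldl_cons, bStep, hv', Bool.false_eq_true, if_false, Bool.false_and]
        rw [ih1 acc]
        simp [tks, hv']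
    · intro acc tok
      by_cases hv : (isLong c || isShort c) = true
      · simp only [List.foldl_cons, bStep, hv, if_pos]
        rw [ih2 (acc ++ [tok]) [c]]
        simp [tks, hv, List.takeWhile, List.dropWhile, vowel_not_cons c hv]
      · have hv' : (isLong c || isShort c) = false := by simpa using hv
        by_cases hc : isCons c = true
        · simp only [List.foldl_cons, bStep, hv', Bool.false_eq_true, if_false, Bool.true_and, hc,
            if_pos, List.dropLast_concat, List.getLastD_concat]
          rw [ih2 acc (tok ++ [c])]
          simp [List.takeWhile, List.dropWhile, hc]
        · have hc' : isCons c = false := by simpa using hc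
          simp only [List.foldl_cons, bStep, hv', Bool.false_eq_true, if_false, Bool.true_and, hc',
            List.foldl_cons]
          rw [ih1 (acc ++ [tok])]
          simp [tks, List.takeWhile, List.dropWhile, hv', hc']

theorem padA_eq (addr : List Int) (m : Int) :
    padA addr m = addr ++ List.replicate (m - addr.length).toNat 0 := by
  fun_induction padA addr m with
  | case1 addr h ih =>
    rw [ih]
    have e : (m - (addr.length : Int)).toNat = ((m - ((addr ++ [0]).length : Int)).toNat) + 1 := by
      simp only [List.length_append, List.length_cons, List.length_nil]
      omega
    rw [e, List.replicate_succ, List.append_assoc]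
    rfl
  | case2 addr h =>
    have e : (m - (addr.length : Int)).toNat = 0 := by omega
    simp [e]

-- ===== VERDICT (by name: the statement is the Claim_ definition above) =====
theorem compute_pingala_address_spec : Claim_equal_compute_pingala_address := by
  intro s m _
  unfold Spec_compute_pingala_address
  simp only [compute_pingala_address, compute_pingala_address_alt]
  rw [(bFold_invariant s.toList).1 [], List.nil_append, ← aLoop_eq_map_classify, padA_eq]
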